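-- pv_equiv track=rewrite | github.com/DragunWF/Competitive-Programming | CodeWars/python/7_kyu/sort_out_the_men_from_boys.py | men_from_boys
-- ===== SOURCE A (Python) =====
-- def men_from_boys(arr: list[int]) -> list[int]:
--     even = []
--     odd = []
--     for num in arr:
--         if num % 2 == 0 and not num in even:
--             even.append(num)
--         elif num % 2 != 0 and not num in odd:
--             odd.append(num)
--     even.sort()
--     odd.sort(reverse=True)
--     return [*even, *odd]
-- ===== SOURCE B (Python) =====
-- def men_from_boys(arr: list[int]) -> list[int]:
--     s = sorted(set(arr))
--     evens = [x for x in s if x % 2 == 0]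
--     odds = [x for x in reversed(s) if x % 2]
--     return evens + odds
-- ===== Notes on version B (the rewrite author's own statement) =====
-- stated objective: faster
-- what changed: Instead of deduplicating into two buckets with linear membership scans during the traversal and then sorting each bucket separately (one reverse-sorted), B builds the sorted deduplicated set once and derives the ascending evens by a forward filter and the descending odds by filtering the reversed sorted list.
import Mathlib
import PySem

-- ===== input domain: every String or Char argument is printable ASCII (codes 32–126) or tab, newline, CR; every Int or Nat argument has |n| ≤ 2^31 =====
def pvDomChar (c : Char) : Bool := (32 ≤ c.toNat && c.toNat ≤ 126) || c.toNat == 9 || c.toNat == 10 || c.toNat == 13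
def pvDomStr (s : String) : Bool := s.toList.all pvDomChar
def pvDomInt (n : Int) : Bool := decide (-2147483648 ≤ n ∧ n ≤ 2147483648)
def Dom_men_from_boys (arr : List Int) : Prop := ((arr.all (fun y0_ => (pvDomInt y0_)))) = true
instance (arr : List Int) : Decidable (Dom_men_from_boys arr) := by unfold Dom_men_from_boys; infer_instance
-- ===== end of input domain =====

-- B sorts the deduplicated set once and extracts evens by a forward filter and odds by
-- filtering the reversal, replacing A's bucket-wise dedup-then-two-sorts; objective: faster (hash-set dedup removes the per-element list scans).

-- ===== PORT A =====
def mfbStep (st : List Int × List Int) (num : Int) : List Int × List Int :=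
  if PySem.Int.mod num 2 == 0 && !(st.1.contains num) then (st.1 ++ [num], st.2)
  else if PySem.Int.mod num 2 != 0 && !(st.2.contains num) then (st.1, st.2 ++ [num])
  else st

def men_from_boys (arr : List Int) : List Int :=
  let p := arr.foldl mfbStep ([], [])
  PySem.List.sorted p.1 (fun x => x) false ++ PySem.List.sorted p.2 (fun x => x) true

-- ===== PORT B =====
def men_from_boys_alt (arr : List Int) : List Int :=
  let s := PySem.List.sorted (PySem.Set.ofList arr) (fun x => x) false
  let evens := s.filter (fun x => PySem.Int.mod x 2 == 0)
  let odds := s.reverse.filter (fun x => PySem.Int.mod x 2 != 0)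
  evens ++ odds

-- ===== PRECONDITION & SPEC =====
def Spec_men_from_boys (arr : List Int) (out : List Int) : Prop := out = men_from_boys_alt arr
instance (arr : List Int) (out : List Int) : Decidable (Spec_men_from_boys arr out) := by unfold Spec_men_from_boys; infer_instance

-- ===== CLAIM (what is proved, stated in full; the proofs are below) =====
def Claim_equal_men_from_boys : Prop := ∀ (arr : List Int), Dom_men_from_boys arr → Spec_men_from_boys arr (men_from_boys arr)

-- ===== LEMMAS AND PROOFS =====
-- Loop invariant for A's fold: the buckets stay duplicate-free, and membership is
-- "was there already, or occurs in the remaining input with the right parity".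
theorem mfb_inv (arr : List Int) (e o : List Int) (he : e.Nodup) (ho : o.Nodup) :
    (arr.foldl mfbStep (e, o)).1.Nodup ∧ (arr.foldl mfbStep (e, o)).2.Nodup ∧
    (∀ x, x ∈ (arr.foldl mfbStep (e, o)).1 ↔ x ∈ e ∨ (x ∈ arr ∧ 2 ∣ x)) ∧
    (∀ x, x ∈ (arr.foldl mfbStep (e, o)).2 ↔ x ∈ o ∨ (x ∈ arr ∧ ¬ 2 ∣ x)) := by
  induction arr generalizing e o with
  | nil => simp [he, ho]
  | cons a t ih =>
    simp only [List.foldl_cons]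
    by_cases hpe : 2 ∣ a
    · by_cases hmem : a ∈ e
      · have hstep : mfbStep (e, o) a = (e, o) := by
          simp [mfbStep, hpe, hmem]
        rw [hstep]
        obtain ⟨h1, h2, h3, h4⟩ := ih e o he ho
        refine ⟨h1, h2, fun x => ?_, fun x => ?_⟩ <;>
          [rw [h3 x]; rw [h4 x]] <;> by_cases hx : x = a <;> (try subst hx) <;>
          simp only [List.mem_cons] <;> tauto
      · have hstep : mfbStep (e, o) a = (e ++ [a], o) := by
          simp [mfbStep, hpe, hmem]
        rw [hstep]
        have he' : (e ++ [a]).Nodup := by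
          simp [List.nodup_append, he]
          intro b hb hba
          exact hmem (hba ▸ hb)
        obtain ⟨h1, h2, h3, h4⟩ := ih (e ++ [a]) o he' ho
        refine ⟨h1, h2, fun x => ?_, fun x => ?_⟩ <;>
          [rw [h3 x]; rw [h4 x]] <;> by_cases hx : x = a <;> (try subst hx) <;>
          simp only [List.mem_cons, List.mem_append] <;> tauto
    · by_cases hmem : a ∈ o
      · have hstep : mfbStep (e, o) a = (e, o) := by
          simp [mfbStep, hpe, hmem]
        rw [hstep]
        obtain ⟨h1, h2, h3, h4⟩ := ih e o he ho
        refine ⟨h1, h2, fun x => ?_, fun x => ?_⟩ <;>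
          [rw [h3 x]; rw [h4 x]] <;> by_cases hx : x = a <;> (try subst hx) <;>
          simp only [List.mem_cons] <;> tauto
      · have hstep : mfbStep (e, o) a = (e, o ++ [a]) := by
          simp [mfbStep, hpe, hmem]
        rw [hstep]
        have ho' : (o ++ [a]).Nodup := by
          simp [List.nodup_append, ho]
          intro b hb hba
          exact hmem (hba ▸ hb)
        obtain ⟨h1, h2, h3, h4⟩ := ih e (o ++ [a]) he ho'
        refine ⟨h1, h2, fun x => ?_, fun x => ?_⟩ <;>
          [rw [h3 x]; rw [h4 x]] <;> by_cases hx : x = a <;> (try subst hx) <;>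
          simp only [List.mem_cons, List.mem_append] <;> tauto

-- ===== VERDICT (by name: the statement is the Claim_ definition above) =====
theorem men_from_boys_spec : Claim_equal_men_from_boys := by
  intro arr _
  unfold Spec_men_from_boys men_from_boys men_from_boys_alt
  obtain ⟨hE, hO, hmE, hmO⟩ := mfb_inv arr [] [] List.nodup_nil List.nodup_nil
  set E := (arr.foldl mfbStep ([], [])).1 with hEdef
  set O := (arr.foldl mfbStep ([], [])).2 with hOdef
  set s := PySem.List.sorted (PySem.Set.ofList arr) (fun x => x) false with hs
  have hslt : s.Pairwise (· < ·) := PySem.List.sorted_ofList_pairwise_lt arr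
  have hmems : ∀ x, x ∈ s ↔ x ∈ arr := by
    intro x
    rw [hs, PySem.List.mem_sorted, PySem.Set.mem_ofList]
  have hev : PySem.List.sorted E (fun x => x) false
      = s.filter (fun x => PySem.Int.mod x 2 == 0) := by
    apply PySem.List.sorted_eq_of_perm_of_pairwise_lt
    · apply (List.perm_ext_iff_of_nodup (List.Nodup.filter _ (hslt.imp ne_of_lt)) hE).mpr
      intro x
      rw [List.mem_filter, hmems, hmE x]
      simp
    · exact hslt.filter _
  have hod : PySem.List.sorted O (fun x => x) true
      = s.reverse.filter (fun x => PySem.Int.mod x 2 != 0) := by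
    apply PySem.List.sorted_rev_eq_of_perm_of_pairwise_gt
    · apply (List.perm_ext_iff_of_nodup
        (List.Nodup.filter _ ((List.pairwise_reverse.mpr hslt).imp (fun h => ne_of_gt h))) hO).mpr
      intro x
      rw [List.mem_filter, List.mem_reverse, hmems, hmO x]
      simp
    · exact (List.pairwise_reverse.mpr hslt).filter _
  simp only []
  rw [hev, hod]
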